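-- pv_equiv track=rewrite | github.com/Szymon-Budziak/Algorithms_and_Data_Structures_course_AGH | Dynamic Programming/31_maximum_splitting.py | maximum_splitting
-- ===== SOURCE A (Python) =====
-- def maximum_splitting(number):
--     if number < 3:
--         return -1
--     else:
--         DP = [-1] * 17
--         DP[0] = 0
--         for j in range(4, 17):
--             for k in [4, 6, 9]:
--                 if j >= k and DP[j - k] != -1:
--                     DP[j] = max(DP[j], DP[j - k] + 1)
--         if 4 < number < 16:
--             return DP[number]
--         else:
--             index = (number - 16) // 4 + 1
--             return DP[number - index * 4] + index
-- ===== SOURCE B (Python) =====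
-- def maximum_splitting(number):
--     # Closed-form by residue mod 4 instead of a DP table + arithmetic reduction.
--     if number < 3:
--         return -1
--     r = number % 4
--     if r == 0:
--         return number // 4
--     if r == 1:
--         return (number - 9) // 4 + 1 if number >= 9 else -1
--     if r == 2:
--         return (number - 6) // 4 + 1
--     return (number - 15) // 4 + 2 if number >= 15 else -1
-- ===== Notes on version B (the rewrite author's own statement) =====
-- stated objective: simpler
-- what changed: Replaced A's fixed DP table build and its arithmetic-reduction branch with a direct closed-form case split on the residue of number modulo four (one nine / one six / a six plus a nine, plus fours).
import Mathlib
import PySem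

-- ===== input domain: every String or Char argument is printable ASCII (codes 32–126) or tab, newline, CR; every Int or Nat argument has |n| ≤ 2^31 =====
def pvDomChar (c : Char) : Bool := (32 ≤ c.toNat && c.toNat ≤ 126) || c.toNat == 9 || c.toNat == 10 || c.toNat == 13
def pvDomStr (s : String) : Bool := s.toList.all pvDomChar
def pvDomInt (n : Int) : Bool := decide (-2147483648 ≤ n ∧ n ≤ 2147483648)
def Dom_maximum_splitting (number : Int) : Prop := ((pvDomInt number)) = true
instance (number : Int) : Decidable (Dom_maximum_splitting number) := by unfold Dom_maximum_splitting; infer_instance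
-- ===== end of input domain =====

-- ===== PORT A =====
-- B is a closed-form case split on number % 4 replacing A's DP table; return values proved equal on all of Dom.
-- helper: Python list item assignment DP[i] = v (exact for 0 <= i < len(DP), which holds at every write A makes)
def pySetInt (xs : List Int) (i : Int) (v : Int) : List Int := xs.set i.toNat v

-- the DP-table build A performs (it does not depend on `number`)
def pvBuildDP : List Int :=
  let DP : List Int := pySetInt (List.replicate 17 (-1)) 0 0
  (PySem.List.pyRange 4 17 1).foldl (fun DP j =>
    ([4, 6, 9] : List Int).foldl (fun DP k =>
      if j ≥ k ∧ PySem.List.pyGetD DP (j - k) 0 ≠ -1 then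
        pySetInt DP j (max (PySem.List.pyGetD DP j 0) (PySem.List.pyGetD DP (j - k) 0 + 1))
      else DP) DP) DP

def maximum_splitting (number : Int) : Int :=
  if number < 3 then -1
  else
    let DP := pvBuildDP
    if 4 < number ∧ number < 16 then PySem.List.pyGetD DP number 0
    else
      let index := PySem.Int.floordiv (number - 16) 4 + 1
      PySem.List.pyGetD DP (number - index * 4) 0 + index

-- ===== PORT B =====
def maximum_splitting_alt (number : Int) : Int :=
  if number < 3 then -1
  else
    let r := PySem.Int.mod number 4
    if r = 0 then PySem.Int.floordiv number 4
    else if r = 1 then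
      if number ≥ 9 then PySem.Int.floordiv (number - 9) 4 + 1 else -1
    else if r = 2 then PySem.Int.floordiv (number - 6) 4 + 1
    else
      if number ≥ 15 then PySem.Int.floordiv (number - 15) 4 + 2 else -1

-- ===== PRECONDITION & SPEC =====
def Spec_maximum_splitting (number : Int) (out : Int) : Prop := out = maximum_splitting_alt number
instance (number : Int) (out : Int) : Decidable (Spec_maximum_splitting number out) := by unfold Spec_maximum_splitting; infer_instance

-- ===== CLAIM (what is proved, stated in full; the proofs are below) =====
def Claim_equal_maximum_splitting : Prop := ∀ (number : Int), Dom_maximum_splitting number → Spec_maximum_splitting number (maximum_splitting number)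

-- ===== LEMMAS AND PROOFS =====

set_option maxRecDepth 8192 in
theorem pvDP12 : PySem.List.pyGetD pvBuildDP (12 : Int) 0 = 3 := by decide
set_option maxRecDepth 8192 in
theorem pvDP13 : PySem.List.pyGetD pvBuildDP (13 : Int) 0 = 2 := by decide
set_option maxRecDepth 8192 in
theorem pvDP14 : PySem.List.pyGetD pvBuildDP (14 : Int) 0 = 3 := by decide
set_option maxRecDepth 8192 in
theorem pvDP15 : PySem.List.pyGetD pvBuildDP (15 : Int) 0 = 2 := by decide

theorem pv_big (n : Int) (h17 : 17 ≤ n) :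
    maximum_splitting n = maximum_splitting_alt n := by
  have h4 : (0:Int) < 4 := by norm_num
  unfold maximum_splitting maximum_splitting_alt
  simp only [PySem.Int.floordiv_eq_ediv_of_pos h4, PySem.Int.mod_eq_emod_of_pos h4]
  rw [if_neg (by omega), if_neg (by omega), if_neg (by omega)]
  have hr : n % 4 = 0 ∨ n % 4 = 1 ∨ n % 4 = 2 ∨ n % 4 = 3 := by omega
  rcases hr with h | h | h | h
  · rw [if_pos h, show n - ((n - 16) / 4 + 1) * 4 = (12:Int) by omega, pvDP12]; omega
  · rw [if_neg (by omega), if_pos h, if_pos (by omega),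
      show n - ((n - 16) / 4 + 1) * 4 = (13:Int) by omega, pvDP13]; omega
  · rw [if_neg (by omega), if_neg (by omega), if_pos h,
      show n - ((n - 16) / 4 + 1) * 4 = (14:Int) by omega, pvDP14]; omega
  · rw [if_neg (by omega), if_neg (by omega), if_neg (by omega), if_pos (by omega),
      show n - ((n - 16) / 4 + 1) * 4 = (15:Int) by omega, pvDP15]; omega

-- ===== VERDICT (by name: the statement is the Claim_ definition above) =====
set_option maxRecDepth 8192 in
theorem maximum_splitting_spec : Claim_equal_maximum_splitting := by
  intro n _
  unfold Spec_maximum_splitting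
  by_cases hlo : n < 3
  · unfold maximum_splitting maximum_splitting_alt
    rw [if_pos hlo, if_pos hlo]
  · by_cases hhi : n ≤ 16
    · have h3 : 3 ≤ n := by omega
      interval_cases n <;> decide
    · exact pv_big n (by omega)
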